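-- pv_equiv track=rewrite | github.com/YJ-EBD/MELAUHF-IOT | ABBAS_WEB/router/pages.py | _parse_pipe_kv
-- ===== SOURCE A (Python) =====
-- def _parse_pipe_kv(line: str) -> dict[str, str]:
--     out: dict[str, str] = {}
--     parts = (line or "").split("|")
--     for seg in parts[1:]:
--         if "=" not in seg:
--             continue
--         k, v = seg.split("=", 1)
--         k = (k or "").strip()
--         if not k:
--             continue
--         out[k] = (v or "").strip()
--     return out
-- ===== SOURCE B (Python) =====
-- def _parse_pipe_kv(line: str) -> dict[str, str]:
--     # Single left-to-right character scan with a small state machine: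
--     # no split() calls, no per-segment re-scan for '='.
--     out: dict[str, str] = {}
--     started = False   # have we passed the first '|'?
--     key = None        # stripped key of the current segment once '=' was seen
--     buf = []          # chars of the pending key (before '=') or value (after)
--     for ch in (line or ""):
--         if ch == "|":
--             if started and key:
--                 out[key] = "".join(buf).strip()
--             started, key, buf = True, None, []
--         elif started:
--             if key is None and ch == "=":
--                 key = "".join(buf).strip()
--                 buf = []
--             else:
--                 buf.append(ch)
--     if started and key:
--         out[key] = "".join(buf).strip()
--     return out
-- ===== Notes on version B (the rewrite author's own statement) =====
-- stated objective: alternative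
-- what changed: Replaces split('|') plus a per-segment split('=',1) with a single left-to-right character scan driven by a small state machine (started / pending key / buffer) that builds the dict in one pass.
import Mathlib
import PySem

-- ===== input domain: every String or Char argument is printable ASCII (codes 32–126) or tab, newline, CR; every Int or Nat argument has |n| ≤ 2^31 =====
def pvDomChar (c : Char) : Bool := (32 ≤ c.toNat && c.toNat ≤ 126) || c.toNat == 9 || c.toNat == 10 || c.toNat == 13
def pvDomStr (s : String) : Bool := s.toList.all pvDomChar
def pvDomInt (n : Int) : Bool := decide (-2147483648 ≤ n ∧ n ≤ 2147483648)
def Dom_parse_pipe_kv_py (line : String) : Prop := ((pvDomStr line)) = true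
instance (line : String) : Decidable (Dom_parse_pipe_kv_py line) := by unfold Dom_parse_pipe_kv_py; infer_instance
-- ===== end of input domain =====

-- B replaces A's split("|") + per-segment split("=",1) with a single character-level
-- state-machine pass (alternative decomposition; return value proved equal on all inputs).

-- ===== PORT A =====
def parse_pipe_kv_py (line : String) : List (String × String) :=
  -- '(line or "")' equals 'line' itself (it is "" exactly when line = "")
  let parts := (PySem.Str.split? line "|").getD []   -- sep "|" ≠ "", so split? is always 'some'
  let out := (parts.drop 1).foldl (fun (out : PySem.Dict String String) seg =>
      if PySem.Str.isIn "=" seg then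
        match PySem.Str.splitMax? seg "=" 1 with
        | some [k, v] =>
            let k := PySem.Str.strip k
            if k = "" then out else out.insert k (PySem.Str.strip v)
        | _ => out   -- unreachable: split(sep, 1) with sep present yields exactly two pieces
      else out) PySem.Dict.empty
  out.items

-- ===== PORT B =====
-- flush of the pending segment: Python's 'if started and key: out[key] = "".join(buf).strip()'
def pvFlush (out : PySem.Dict String String) (started : Bool) (key : Option String)
    (buf : List Char) : PySem.Dict String String :=
  if started then
    match key with
    | some k => if k = "" then out else out.insert k (PySem.Str.strip (String.ofList buf))
    | none => out
  else out

-- the loop body of B's scan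
def pvStepB (st : PySem.Dict String String × Bool × Option String × List Char) (ch : Char) :
    PySem.Dict String String × Bool × Option String × List Char :=
  let (out, started, key, buf) := st
  if ch = '|' then (pvFlush out started key buf, true, none, [])
  else if started then
    match key with
    | none =>
        if ch = '=' then (out, started, some (PySem.Str.strip (String.ofList buf)), [])
        else (out, started, none, buf ++ [ch])
    | some k => (out, started, some k, buf ++ [ch])
  else st

def parse_pipe_kv_py_alt (line : String) : List (String × String) :=
  let fin := line.toList.foldl pvStepB (PySem.Dict.empty, false, none, [])
  (pvFlush fin.1 fin.2.1 fin.2.2.1 fin.2.2.2).items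

-- ===== PRECONDITION & SPEC =====
def Spec_parse_pipe_kv_py (line : String) (out : List (String × String)) : Prop := out = parse_pipe_kv_py_alt line
instance (line : String) (out : List (String × String)) : Decidable (Spec_parse_pipe_kv_py line out) := by unfold Spec_parse_pipe_kv_py; infer_instance

-- ===== CLAIM (what is proved, stated in full; the proofs are below) =====
def Claim_equal_parse_pipe_kv_py : Prop := ∀ (line : String), Dom_parse_pipe_kv_py line → Spec_parse_pipe_kv_py line (parse_pipe_kv_py line)

-- ===== LEMMAS AND PROOFS =====

-- reference split on '|', structural recursion
def pvSplit (cur : List Char) : List Char → List (List Char)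
  | [] => [cur]
  | c :: rest => if c = '|' then cur :: pvSplit [] rest else pvSplit (cur ++ [c]) rest

-- A's per-segment action, characterized at the char level
def pvProcSeg (d : PySem.Dict String String) (seg : List Char) : PySem.Dict String String :=
  if '=' ∈ seg then
    let k := PySem.Chars.strip (seg.takeWhile (· ≠ '='))
    if k = [] then d
    else d.insert (String.ofList k)
      (String.ofList (PySem.Chars.strip ((seg.dropWhile (· ≠ '=')).tail)))
  else d

-- B's (key, buf) state as a function of the chars of the current segment read so far
def pvState (p : List Char) : Option String × List Char :=
  if '=' ∈ p then
    (some (PySem.Str.strip (String.ofList (p.takeWhile (· ≠ '=')))), (p.dropWhile (· ≠ '=')).tail)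
  else (none, p)

theorem pv_go_spec : ∀ (l : List Char) (fuel : Nat) (cur : List Char) (acc : List (List Char)),
    l.length ≤ fuel →
    PySem.Chars.splitOn.go ['|'] fuel l cur acc = acc.reverse ++ pvSplit cur.reverse l := by
  intro l
  induction l with
  | nil =>
      intro fuel cur acc _
      cases fuel <;> simp [PySem.Chars.splitOn.go, pvSplit]
  | cons c rest ih =>
      intro fuel cur acc h
      cases fuel with
      | zero => simp at h
      | succ fuel =>
        simp only [PySem.Chars.splitOn.go, List.isPrefixOf, pvSplit]
        by_cases hc : c = '|'
        · subst hc
          simp only [beq_self_eq_true, Bool.true_and, if_pos, List.length_cons, List.drop_succ_cons,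
            List.length_nil, List.drop_zero]
          rw [ih fuel [] (cur.reverse :: acc) (by simpa using Nat.le_of_succ_le_succ h)]
          simp [pvSplit]
        · rw [if_neg (by simp [List.isPrefixOf]; exact fun hh => hc hh.symm)]
          rw [ih fuel (c :: cur) acc (by simpa using Nat.le_of_succ_le_succ h)]
          simp [hc]

theorem pv_splitOn_eq (s : List Char) : PySem.Chars.splitOn s ['|'] = pvSplit [] s := by
  have := pv_go_spec s (s.length + 1) [] [] (by omega)
  simpa [PySem.Chars.splitOn] using this

theorem pv_goMax_zero : ∀ (fuel : Nat) (l cur : List Char) (acc : List (List Char)),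
    PySem.Chars.splitOnMax.go ['='] fuel 0 l cur acc = ((cur.reverse ++ l) :: acc).reverse := by
  intro fuel l cur acc
  cases fuel <;> cases l <;> simp [PySem.Chars.splitOnMax.go]

theorem pv_goMax_one : ∀ (l : List Char) (fuel : Nat) (cur : List Char) (acc : List (List Char)),
    l.length ≤ fuel →
    PySem.Chars.splitOnMax.go ['='] fuel 1 l cur acc =
      if '=' ∈ l then
        acc.reverse ++ [cur.reverse ++ l.takeWhile (· ≠ '='), (l.dropWhile (· ≠ '=')).tail]
      else acc.reverse ++ [cur.reverse ++ l] := by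
  intro l
  induction l with
  | nil =>
      intro fuel cur acc _
      cases fuel <;> simp [PySem.Chars.splitOnMax.go]
  | cons c rest ih =>
      intro fuel cur acc h
      cases fuel with
      | zero => simp at h
      | succ fuel =>
        simp only [PySem.Chars.splitOnMax.go]
        rw [if_neg (by omega)]
        by_cases hc : c = '='
        · subst hc
          rw [if_pos (by simp [List.isPrefixOf])]
          rw [pv_goMax_zero]
          simp [List.takeWhile, List.dropWhile]
        · rw [if_neg (by simp [List.isPrefixOf]; exact fun hh => hc hh.symm)]
          rw [ih fuel (c :: cur) acc (by simpa using Nat.le_of_succ_le_succ h)]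
          by_cases hm : '=' ∈ rest <;>
            simp [hm, hc, List.takeWhile, List.dropWhile, Ne.symm hc]

theorem pv_splitMax_eq (s : List Char) :
    PySem.Chars.splitOnMax s ['='] 1 =
      if '=' ∈ s then [s.takeWhile (· ≠ '='), (s.dropWhile (· ≠ '=')).tail] else [s] := by
  have := pv_goMax_one s (s.length + 1) [] [] (by omega)
  simp only [PySem.Chars.splitOnMax]
  rw [if_neg (by omega)]
  simpa using this

theorem pv_tw_mem (p q : List Char) (h : '=' ∈ p) :
    (p ++ q).takeWhile (· ≠ '=') = p.takeWhile (· ≠ '=') := by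
  induction p with
  | nil => simp at h
  | cons c rest ih =>
      by_cases hc : c = '='
      · subst hc; simp [List.takeWhile]
      · simp only [List.mem_cons] at h
        have h' : '=' ∈ rest := h.resolve_left (fun hh => hc hh.symm)
        have hp : (fun x => decide (x ≠ '=')) c = true := by simp [hc]
        rw [List.cons_append, List.takeWhile_cons_of_pos (p := fun x => decide (x ≠ '=')) hp, List.takeWhile_cons_of_pos (p := fun x => decide (x ≠ '=')) hp, ih h']

theorem pv_dw_mem (p q : List Char) (h : '=' ∈ p) :
    (p ++ q).dropWhile (· ≠ '=') = p.dropWhile (· ≠ '=') ++ q := by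
  induction p with
  | nil => simp at h
  | cons c rest ih =>
      by_cases hc : c = '='
      · subst hc; simp [List.dropWhile]
      · simp only [List.mem_cons] at h
        have h' : '=' ∈ rest := h.resolve_left (fun hh => hc hh.symm)
        have hp : (fun x => decide (x ≠ '=')) c = true := by simp [hc]
        rw [List.cons_append, List.dropWhile_cons_of_pos (p := fun x => decide (x ≠ '=')) hp, List.dropWhile_cons_of_pos (p := fun x => decide (x ≠ '=')) hp, ih h']

theorem pv_tw_nomem (p q : List Char) (h : '=' ∉ p) :
    (p ++ q).takeWhile (· ≠ '=') = p ++ q.takeWhile (· ≠ '=') := by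
  induction p with
  | nil => simp
  | cons c rest ih =>
      simp only [List.mem_cons, not_or] at h
      have hc : c ≠ '=' := fun hh => h.1 hh.symm
      have hp : (fun x => decide (x ≠ '=')) c = true := by simp [hc]
      rw [List.cons_append, List.takeWhile_cons_of_pos (p := fun x => decide (x ≠ '=')) hp, ih h.2, List.cons_append]

theorem pv_dw_nomem (p q : List Char) (h : '=' ∉ p) :
    (p ++ q).dropWhile (· ≠ '=') = q.dropWhile (· ≠ '=') := by
  induction p with
  | nil => simp
  | cons c rest ih =>
      simp only [List.mem_cons, not_or] at h
      have hc : c ≠ '=' := fun hh => h.1 hh.symm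
      have hp : (fun x => decide (x ≠ '=')) c = true := by simp [hc]
      rw [List.cons_append, List.dropWhile_cons_of_pos (p := fun x => decide (x ≠ '=')) hp, ih h.2]

theorem pv_isIn_eq (seg : List Char) : PySem.Chars.isIn ['='] seg = decide ('=' ∈ seg) := by
  by_cases h : '=' ∈ seg
  · obtain ⟨s, t, rfl⟩ := List.append_of_mem h
    have hinf : ['='] <:+: s ++ '=' :: t := ⟨s, t, by simp⟩
    have h1 : PySem.Chars.isIn ['='] (s ++ '=' :: t) = true := by
      rw [PySem.Chars.isIn_iff_infix]; exact hinf
    simp [h1, h]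
  · have hinf : ¬ (['='] <:+: seg) := fun hi => h (by
      have := hi.sublist
      simpa using this.mem (by simp))
    have h1 : PySem.Chars.isIn ['='] seg = false := by
      rw [PySem.Chars.isIn_eq_false_iff]; exact hinf
    simp [h1, h]

theorem pv_strip_ofList (l : List Char) :
    PySem.Str.strip (String.ofList l) = String.ofList (PySem.Chars.strip l) := by
  simp [PySem.Str.strip]

theorem pv_Abody (d : PySem.Dict String String) (seg : List Char) :
    (if PySem.Str.isIn "=" (String.ofList seg) then
       match PySem.Str.splitMax? (String.ofList seg) "=" 1 with
       | some [k, v] =>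
           let k := PySem.Str.strip k
           if k = "" then d else d.insert k (PySem.Str.strip v)
       | _ => d
     else d) = pvProcSeg d seg := by
  have hIn : PySem.Str.isIn "=" (String.ofList seg) = decide ('=' ∈ seg) := by
    simp only [PySem.Str.isIn, String.toList_ofList]
    exact pv_isIn_eq seg
  by_cases h : '=' ∈ seg
  · rw [pvProcSeg, if_pos h, hIn]
    simp only [h, decide_true, if_true]
    have hs : PySem.Str.splitMax? (String.ofList seg) "=" 1 =
        some [String.ofList (seg.takeWhile (· ≠ '=')),
              String.ofList ((seg.dropWhile (· ≠ '=')).tail)] := by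
      simp only [PySem.Str.splitMax?, String.toList_ofList]
      rw [show ("=" : String).toList = ['='] from rfl]
      rw [PySem.Chars.splitMax?]
      rw [if_neg (by simp)]
      rw [pv_splitMax_eq, if_pos h]
      simp
    rw [hs]
    simp only [pv_strip_ofList]
    by_cases hk : PySem.Chars.strip (seg.takeWhile (· ≠ '=')) = []
    · rw [if_pos (by rw [hk]), if_pos hk]
    · rw [if_neg (fun hh => hk (by
        have := congrArg String.toList hh
        simpa using this)), if_neg hk]
  · rw [pvProcSeg, if_neg h, hIn]
    simp [h]

theorem pv_flush_eq (d : PySem.Dict String String) (p : List Char) :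
    pvFlush d true (pvState p).1 (pvState p).2 = pvProcSeg d p := by
  by_cases h : '=' ∈ p
  · simp only [pvState, if_pos h, pvFlush, if_true, pv_strip_ofList, pvProcSeg]
    by_cases hk : PySem.Chars.strip (p.takeWhile (· ≠ '=')) = []
    · rw [if_pos (by rw [hk]), if_pos hk]
    · rw [if_neg (fun hh => hk (by
        have := congrArg String.toList hh
        simpa using this)), if_neg hk]
  · simp [pvState, if_neg h, pvFlush, pvProcSeg, h]

theorem pv_step_eq (d : PySem.Dict String String) (p : List Char) (c : Char) (hc : c ≠ '|') :
    pvStepB (d, true, (pvState p).1, (pvState p).2) c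
      = (d, true, (pvState (p ++ [c])).1, (pvState (p ++ [c])).2) := by
  by_cases h : '=' ∈ p
  · have h' : '=' ∈ p ++ [c] := by simp [h]
    simp only [pvState, if_pos h, if_pos h', pvStepB, if_neg hc]
    rw [pv_tw_mem p [c] h, pv_dw_mem p [c] h]
    have hne : p.dropWhile (· ≠ '=') ≠ [] := by
      intro hnil
      have hm : '=' ∈ p.takeWhile (· ≠ '=') := by
        conv at h => rw [← List.takeWhile_append_dropWhile (p := fun x => decide (x ≠ '=')) (l := p)]
        rw [hnil] at h
        simpa only [List.append_nil] using h
      have := List.mem_takeWhile_imp hm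
      simp at this
    obtain ⟨a, l, hdw⟩ := List.exists_cons_of_ne_nil hne
    rw [hdw]
    simp
  · by_cases he : c = '='
    · subst he
      have h' : '=' ∈ p ++ ['='] := by simp
      simp only [pvState, if_pos h', if_neg h, pvStepB, if_neg hc]
      rw [pv_tw_nomem p ['='] h, pv_dw_nomem p ['='] h]
      simp [List.takeWhile, List.dropWhile]
    · have h' : '=' ∉ p ++ [c] := by
        simp only [List.mem_append, List.mem_singleton, not_or]
        exact ⟨h, fun hh => he hh.symm⟩
      simp only [pvState, if_neg h, if_neg h', pvStepB, if_neg hc]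
      simp [he]

def pvFinish (st : PySem.Dict String String × Bool × Option String × List Char) :
    PySem.Dict String String :=
  pvFlush st.1 st.2.1 st.2.2.1 st.2.2.2

theorem pv_state_nil : pvState [] = (none, []) := by simp [pvState]

theorem pv_main : ∀ (s : List Char) (d : PySem.Dict String String) (p : List Char),
    pvFinish (s.foldl pvStepB (d, true, (pvState p).1, (pvState p).2))
      = (pvSplit p s).foldl pvProcSeg d := by
  intro s
  induction s with
  | nil =>
      intro d p
      simp only [List.foldl_nil, pvFinish, pvSplit]
      exact pv_flush_eq d p
  | cons c rest ih =>
      intro d p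
      by_cases hc : c = '|'
      · subst hc
        rw [List.foldl_cons]
        have hstep : pvStepB (d, true, (pvState p).1, (pvState p).2) '|'
            = (pvProcSeg d p, true, (pvState []).1, (pvState []).2) := by
          simp [pvStepB, pv_state_nil]
          exact pv_flush_eq d p
        rw [hstep, ih]
        simp [pvSplit]
      · rw [List.foldl_cons, pv_step_eq d p c hc, ih]
        simp [pvSplit, hc]

theorem pv_tail_split : ∀ (s p q : List Char), (pvSplit p s).tail = (pvSplit q s).tail := by
  intro s
  induction s with
  | nil => intro p q; simp [pvSplit]
  | cons c rest ih =>
      intro p q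
      by_cases hc : c = '|'
      · simp [pvSplit, hc]
      · simp only [pvSplit, if_neg hc]
        exact ih _ _

theorem pv_pre : ∀ (s : List Char) (d : PySem.Dict String String)
    (key : Option String) (buf : List Char),
    pvFinish (s.foldl pvStepB (d, false, key, buf))
      = ((pvSplit [] s).tail).foldl pvProcSeg d := by
  intro s
  induction s with
  | nil => intro d key buf; simp [pvFinish, pvFlush, pvSplit]
  | cons c rest ih =>
      intro d key buf
      by_cases hc : c = '|'
      · subst hc
        rw [List.foldl_cons]
        have hstep : pvStepB (d, false, key, buf) '|'
            = (d, true, (pvState []).1, (pvState []).2) := by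
          simp [pvStepB, pvFlush, pv_state_nil]
        rw [hstep, pv_main]
        simp [pvSplit]
      · rw [List.foldl_cons]
        have hstep : pvStepB (d, false, key, buf) c = (d, false, key, buf) := by
          simp [pvStepB, hc]
        rw [hstep, ih]
        simp only [pvSplit, hc, if_neg hc, List.nil_append]
        exact (pv_tail_split rest [] [c]).symm ▸ rfl

-- ===== VERDICT (by name: the statement is the Claim_ definition above) =====
theorem parse_pipe_kv_py_spec : Claim_equal_parse_pipe_kv_py := by
  intro line _
  unfold Spec_parse_pipe_kv_py
  have hsplit : PySem.Str.split? line "|"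
      = some ((PySem.Chars.splitOn line.toList ['|']).map String.ofList) := by
    simp [PySem.Str.split?, PySem.Chars.split?]
  rw [parse_pipe_kv_py, hsplit]
  simp only [Option.getD_some, pv_splitOn_eq]
  rw [← List.map_drop, List.foldl_map]
  simp only [pv_Abody]
  rw [parse_pipe_kv_py_alt]
  show _ = (pvFinish (line.toList.foldl pvStepB (PySem.Dict.empty, false, none, []))).items
  rw [pv_pre]
  rw [List.drop_one]
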